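-- pv_equiv track=rewrite | github.com/tnpfldyd/TIL | 백준/Gold/1407. 2로 몇 번 나누어질까/2로 몇 번 나누어질까.py | calc
-- ===== SOURCE A (Python) =====
-- def calc(number):
--   if not number:
--     return 0
--   elif number == 1:
--     return 1
--   elif not number % 2:
--     return number // 2 + 2 * calc(number // 2)
--   else:
--     return number // 2 + 2 * calc(number // 2) + 1
-- ===== SOURCE B (Python) =====
-- def calc(number):
--     total = 0
--     weight = 1
--     while number:
--         total += weight * (number // 2 + number % 2)
--         number //= 2
--         weight *= 2
--     return total
-- ===== Notes on version B (the rewrite author's own statement) =====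
-- stated objective: alternative
-- what changed: Replaces the recursive recurrence f(n)=n//2+(n%2)+2*f(n//2) by an iterative while-loop that threads an explicit power-of-two weight accumulator instead of recursing.
import Mathlib
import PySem

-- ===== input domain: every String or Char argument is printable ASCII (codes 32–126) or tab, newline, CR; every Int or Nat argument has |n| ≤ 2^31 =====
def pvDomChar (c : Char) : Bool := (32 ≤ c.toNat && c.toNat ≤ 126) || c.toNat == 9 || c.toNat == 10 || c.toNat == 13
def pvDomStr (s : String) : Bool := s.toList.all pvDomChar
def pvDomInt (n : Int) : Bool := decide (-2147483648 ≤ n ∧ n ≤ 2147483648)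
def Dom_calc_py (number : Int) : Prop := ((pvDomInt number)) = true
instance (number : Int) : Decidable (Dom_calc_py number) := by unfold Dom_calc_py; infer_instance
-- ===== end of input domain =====

-- B replaces A's recursion by an iterative loop with an explicit power-of-two weight accumulator (alternative decomposition, same cost).


-- ===== PORT A =====
-- literal port of A's recursion; the fuel argument only makes the recursion total in
-- Lean (number.toNat + 1 steps always suffice when 0 ≤ number; on negative inputs the
-- Python recursion never returns, outside Pre_)
def calcPyFuel : Nat → Int → Int
  | 0, _ => 0
  | fuel + 1, number =>
    if number = 0 then 0
    else if number = 1 then 1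
    else if PySem.Int.mod number 2 = 0 then
      PySem.Int.floordiv number 2 + 2 * calcPyFuel fuel (PySem.Int.floordiv number 2)
    else
      PySem.Int.floordiv number 2 + 2 * calcPyFuel fuel (PySem.Int.floordiv number 2) + 1

def calc_py (number : Int) : Int := calcPyFuel (number.toNat + 1) number

-- ===== PORT B =====
-- the 'while number:' loop of Source B, state (number, total, weight); fuel only makes the
-- loop total in Lean (on negative inputs the Python loop never terminates, outside Pre_)
def calcAltLoop : Nat → Int → Int → Int → Int
  | 0, _, total, _ => total
  | fuel + 1, number, total, weight =>
    if number = 0 then total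
    else calcAltLoop fuel (PySem.Int.floordiv number 2)
      (total + weight * (PySem.Int.floordiv number 2 + PySem.Int.mod number 2))
      (weight * 2)

def calc_py_alt (number : Int) : Int := calcAltLoop (number.toNat + 1) number 0 1

-- ===== PRECONDITION & SPEC =====
-- Pre_ excludes negative inputs, on which Python's A raises RecursionError (and B loops forever).
def Pre_calc_py (number : Int) : Prop := 0 ≤ number
instance (number : Int) : Decidable (Pre_calc_py number) := by unfold Pre_calc_py; infer_instance
def pvWitness_calc_py : Int := 5

def Spec_calc_py (number : Int) (out : Int) : Prop := out = calc_py_alt number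
instance (number : Int) (out : Int) : Decidable (Spec_calc_py number out) := by unfold Spec_calc_py; infer_instance

-- ===== CLAIM (what is proved, stated in full; the proofs are below) =====
def Claim_equal_calc_py : Prop := ∀ (number : Int), Dom_calc_py number → Pre_calc_py number → Spec_calc_py number (calc_py number)

-- ===== LEMMAS AND PROOFS =====

theorem calcPyFuel_zero (k : Nat) : calcPyFuel k 0 = 0 := by
  cases k <;> simp [calcPyFuel]

-- A's recursion satisfies the uniform recurrence f(n) = n//2 + n%2 + 2*f(n//2) for n > 0
theorem calcPyFuel_succ_pos (k : Nat) (n : Int) (hn : 0 < n) :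
    calcPyFuel (k + 1) n =
      PySem.Int.floordiv n 2 + PySem.Int.mod n 2 + 2 * calcPyFuel k (PySem.Int.floordiv n 2) := by
  have hfd : PySem.Int.floordiv n 2 = n / 2 := PySem.Int.floordiv_eq_ediv_of_pos (by omega)
  have hm : PySem.Int.mod n 2 = n % 2 := PySem.Int.mod_eq_emod_of_pos (by omega)
  rcases eq_or_lt_of_le (show (1:Int) ≤ n by omega) with h1 | h1
  · -- n = 1
    rw [← h1]
    have hq : PySem.Int.floordiv 1 2 = 0 := by decide
    have hm1 : PySem.Int.mod 1 2 = 1 := by decide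
    simp only [calcPyFuel, hq, hm1, calcPyFuel_zero]
    norm_num
  · -- n > 1
    have hne0 : ¬ n = 0 := by omega
    have hne1 : ¬ n = 1 := by omega
    simp only [calcPyFuel, if_neg hne0, if_neg hne1]
    by_cases hmz : PySem.Int.mod n 2 = 0
    · rw [if_pos hmz, hmz]; ring
    · rw [if_neg hmz]
      have : PySem.Int.mod n 2 = 1 := by omega
      rw [this]; ring

theorem loop_eq (k : Nat) : ∀ (n t w : Int), 0 ≤ n → n.toNat ≤ k →
    calcAltLoop (k + 1) n t w = t + w * calcPyFuel (k + 1) n := by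
  induction k with
  | zero =>
    intro n t w hn hk
    have h0 : n = 0 := by omega
    subst h0
    simp [calcAltLoop, calcPyFuel]
  | succ k ih =>
    intro n t w hn hk
    rcases eq_or_lt_of_le hn with h0 | h0
    · rw [← h0]; simp [calcAltLoop, calcPyFuel]
    · have hfd : PySem.Int.floordiv n 2 = n / 2 := PySem.Int.floordiv_eq_ediv_of_pos (by omega)
      have hne0 : ¬ n = 0 := by omega
      have hq0 : 0 ≤ PySem.Int.floordiv n 2 := by rw [hfd]; omega
      have hqk : (PySem.Int.floordiv n 2).toNat ≤ k := by rw [hfd]; omega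
      rw [show k + 1 + 1 = (k + 1) + 1 from rfl, calcAltLoop, if_neg hne0,
        ih _ _ _ hq0 hqk, calcPyFuel_succ_pos (k + 1) n h0]
      ring

-- ===== VERDICT (by name: the statement is the Claim_ definition above) =====
theorem calc_py_spec : Claim_equal_calc_py := by
  intro number _ hpre
  unfold Spec_calc_py calc_py_alt calc_py
  rw [loop_eq number.toNat number 0 1 hpre (le_refl _)]
  ring
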